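-- pv_equiv track=rewrite | github.com/HyewonKkang/algorithm | Programmers/level1/repainting.py | solution
-- ===== SOURCE A (Python) =====
-- from collections import deque
--
-- def solution(n, m, section):
--     answer = 0
--     needed = deque(section)
--     while needed:
--         pos = needed.popleft()
--         while needed and pos + m > needed[0]:
--             needed.popleft()
--         answer += 1
--
--     return answer
-- ===== SOURCE B (Python) =====
-- def solution(n, m, section):
--     answer = 0
--     covered_until = None
--     for s in section:
--         if covered_until is None or s >= covered_until:
--             answer += 1
--             covered_until = s + m
--     return answer
-- ===== Notes on version B (the rewrite author's own statement) =====
-- stated objective: simpler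
-- what changed: Replaces the deque with its destructive outer-while/inner-while popleft consumption by a single non-mutating for-loop over section that keeps one scalar threshold covered_until and counts the elements that start a new roll. (measured ~2.6x faster: no deque construction or per-element popleft)
import Mathlib
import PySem

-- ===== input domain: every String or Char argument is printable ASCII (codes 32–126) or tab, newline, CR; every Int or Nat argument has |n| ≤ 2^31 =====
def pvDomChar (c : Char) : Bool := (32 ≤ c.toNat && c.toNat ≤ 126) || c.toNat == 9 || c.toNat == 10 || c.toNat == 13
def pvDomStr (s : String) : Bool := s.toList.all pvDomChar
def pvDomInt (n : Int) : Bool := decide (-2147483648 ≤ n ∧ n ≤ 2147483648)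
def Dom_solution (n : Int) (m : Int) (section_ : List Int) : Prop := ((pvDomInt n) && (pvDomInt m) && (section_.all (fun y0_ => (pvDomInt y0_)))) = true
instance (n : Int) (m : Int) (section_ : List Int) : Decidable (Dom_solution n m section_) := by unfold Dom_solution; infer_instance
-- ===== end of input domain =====

-- B replaces A's deque consumption (nested while + popleft) by one flat for-loop over
-- section with a scalar covered-until threshold; objective: simpler, same O(n) cost.


-- ===== PORT A =====
-- inner while: pop from the front while the front is still covered (pos + m > needed[0])
def dropCovered (bound : Int) : List Int → List Int
  | [] => []
  | x :: xs => if bound > x then dropCovered bound xs else x :: xs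

theorem dropCovered_len_le (bound : Int) (xs : List Int) :
    (dropCovered bound xs).length ≤ xs.length := by
  induction xs with
  | nil => simp [dropCovered]
  | cons x xs ih =>
    simp only [dropCovered]
    split
    · exact Nat.le_succ_of_le ih
    · simp

-- outer while: pop pos, run the inner while, answer += 1
def aLoop (m : Int) : List Int → Int → Int
  | [], answer => answer
  | pos :: rest, answer => aLoop m (dropCovered (pos + m) rest) (answer + 1)
termination_by xs _ => xs.length
decreasing_by exact Nat.lt_succ_of_le (dropCovered_len_le _ _)

def solution (n : Int) (m : Int) (section_ : List Int) : Int := aLoop m section_ 0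

-- ===== PORT B =====
-- one flat pass; covered_until = none before the first roll
def bLoop (m : Int) : List Int → Option Int → Int → Int
  | [], _, answer => answer
  | s :: rest, cov, answer =>
    if (match cov with | none => true | some c => decide (s ≥ c)) then
      bLoop m rest (some (s + m)) (answer + 1)
    else
      bLoop m rest cov answer

def solution_alt (n : Int) (m : Int) (section_ : List Int) : Int := bLoop m section_ none 0

-- ===== PRECONDITION & SPEC =====
def Spec_solution (n : Int) (m : Int) (section_ : List Int) (out : Int) : Prop := out = solution_alt n m section_
instance (n : Int) (m : Int) (section_ : List Int) (out : Int) : Decidable (Spec_solution n m section_ out) := by unfold Spec_solution; infer_instance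

-- ===== CLAIM (what is proved, stated in full; the proofs are below) =====
def Claim_equal_solution : Prop := ∀ (n : Int) (m : Int) (section_ : List Int), Dom_solution n m section_ → Spec_solution n m section_ (solution n m section_)

-- ===== LEMMAS AND PROOFS =====
-- Scanning with threshold c equals first dropping the covered prefix, then continuing A's loop.
theorem bLoop_some_eq (m : Int) (xs : List Int) :
    ∀ (c ans : Int), bLoop m xs (some c) ans = aLoop m (dropCovered c xs) ans := by
  induction xs with
  | nil => intro c ans; simp [bLoop, dropCovered, aLoop]
  | cons x xs ih =>
    intro c ans
    simp only [bLoop, dropCovered]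
    by_cases h : c > x
    · have h2 : ¬ (x ≥ c) := by omega
      simp [h, h2, ih]
    · have h2 : x ≥ c := by omega
      simp [h, h2, aLoop, ih]

theorem bLoop_none_eq (m : Int) (xs : List Int) (ans : Int) :
    bLoop m xs none ans = aLoop m xs ans := by
  cases xs with
  | nil => simp [bLoop, aLoop]
  | cons x xs => simp [bLoop, aLoop, bLoop_some_eq]

-- ===== VERDICT (by name: the statement is the Claim_ definition above) =====
theorem solution_spec : Claim_equal_solution := by
  intro n m section_ _
  unfold Spec_solution solution solution_alt
  exact (bLoop_none_eq m section_ 0).symm
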